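-- pv_equiv track=rewrite | github.com/lamborghini1993/LeetCode | other/sample5.py | getMaxGain1
-- ===== SOURCE A (Python) =====
-- def getMaxGain1(n, x, y):
--
--     mx = max(x)  # 获取最大值，作为差的边界
--
--     dp = [[0] * (mx+1) for _ in range(n+1)]  # 初始化dp
--
--     for i in range(2, n+1):
--         for j in range(mx+1):
--             tmp1, tmp2 = 0, 0
--             if j - x[i-1] >= 0:  # 这张卡牌给小a
--                 tmp1 = dp[i-1][j-x[i-1]] + y[i-1]
--
--             if j + x[i - 1] <= mx:  # 这张卡牌给小b
--                 tmp2 = dp[i-1][j+x[i-1]] + y[i-1]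
--
--             dp[i][j] = max(dp[i - 1][j], tmp1, tmp2)  # 三种状态的最高得分
--
--             if i == 1 and j == 0:  # 只有一张卡牌时
--                 dp[i][j] = 0
--     return dp[n][0]
-- ===== SOURCE B (Python) =====
-- def _relax(d, k, v):
--     if k not in d or d[k] < v:
--         d[k] = v
--
--
-- def getMaxGain1(n, x, y):
--     mx = max(x)
--     # Backward induction from the final state: goal maps an offset j to the best
--     # gain collectable by cards i..n when standing at offset j and ending at 0.
--     goal = {0: 0}
--     for i in range(n, 1, -1):
--         xi = x[i - 1]
--         yi = y[i - 1]
--         prev = {}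
--         for j, g in goal.items():
--             _relax(prev, j, g)
--             if j - xi >= 0:
--                 _relax(prev, j - xi, g + yi)
--             if j + xi <= mx:
--                 _relax(prev, j + xi, g + yi)
--         goal = prev
--     return max(goal.values())
-- ===== Notes on version B (the rewrite author's own statement) =====
-- stated objective: alternative
-- what changed: Replaces A's forward dense (n+1)x(mx+1) pull-table (every cell of every row reads three predecessors; answer read at dp[n][0]) by backward induction from the final state: starting from {0: 0} it walks the cards from n down to 2, maintaining a sparse dictionary of only the offsets backward-reachable from the goal state (relax-on-write over the three reverse edges), and returns the max over the surviving start offsets' values.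
import Mathlib
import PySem

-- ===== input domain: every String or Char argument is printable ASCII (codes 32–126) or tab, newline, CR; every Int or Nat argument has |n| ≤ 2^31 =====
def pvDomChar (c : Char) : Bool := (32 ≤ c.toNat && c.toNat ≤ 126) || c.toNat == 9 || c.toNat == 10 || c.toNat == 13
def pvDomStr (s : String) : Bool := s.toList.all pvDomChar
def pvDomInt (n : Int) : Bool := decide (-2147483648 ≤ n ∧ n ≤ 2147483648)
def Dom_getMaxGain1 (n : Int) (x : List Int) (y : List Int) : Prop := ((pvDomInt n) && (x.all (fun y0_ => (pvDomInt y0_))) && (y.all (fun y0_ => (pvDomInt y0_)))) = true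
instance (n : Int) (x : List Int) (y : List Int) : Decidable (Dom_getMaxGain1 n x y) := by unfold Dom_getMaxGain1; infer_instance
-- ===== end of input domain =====

-- B replaces A's forward dense (n+1)x(mx+1) pull-table by backward induction from the final
-- state over a sparse dictionary of backward-reachable offsets; an alternative of similar cost.

-- ===== PORT A =====
def getMaxGain1 (n : Int) (x : List Int) (y : List Int) : Int :=
  let mx := (PySem.List.max? x (fun v => v)).getD 0
  let dp : List (List Int) :=
    (PySem.List.pyRange 0 (n+1)).map (fun _ => List.replicate (mx+1).toNat 0)
  let dp := (PySem.List.pyRange 2 (n+1)).foldl (fun dp i =>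
    (PySem.List.pyRange 0 (mx+1)).foldl (fun dp j =>
      let tmp1 : Int := if 0 ≤ j - PySem.List.pyGetD x (i-1) 0 then
          PySem.List.pyGetD (PySem.List.pyGetD dp (i-1) []) (j - PySem.List.pyGetD x (i-1) 0) 0
            + PySem.List.pyGetD y (i-1) 0
        else 0
      let tmp2 : Int := if j + PySem.List.pyGetD x (i-1) 0 ≤ mx then
          PySem.List.pyGetD (PySem.List.pyGetD dp (i-1) []) (j + PySem.List.pyGetD x (i-1) 0) 0
            + PySem.List.pyGetD y (i-1) 0
        else 0
      let dp := PySem.List.pySetD dp i (PySem.List.pySetD (PySem.List.pyGetD dp i []) j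
        (max (max (PySem.List.pyGetD (PySem.List.pyGetD dp (i-1) []) j 0) tmp1) tmp2))
      if i = 1 ∧ j = 0 then
        PySem.List.pySetD dp i (PySem.List.pySetD (PySem.List.pyGetD dp i []) j 0)
      else dp) dp) dp
  PySem.List.pyGetD (PySem.List.pyGetD dp n []) 0 0

-- ===== PORT B =====
-- helper _relax of Source B: write v at key k only if it improves the stored value
def pvRelax (d : PySem.Dict Int Int) (k v : Int) : PySem.Dict Int Int :=
  match PySem.Dict.get? d k with
  | some w => if w < v then PySem.Dict.insert d k v else d
  | none => PySem.Dict.insert d k v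

def getMaxGain1_alt (n : Int) (x : List Int) (y : List Int) : Int :=
  let mx := (PySem.List.max? x (fun v => v)).getD 0
  let goal0 : PySem.Dict Int Int := PySem.Dict.insert PySem.Dict.empty 0 0
  let goal := (PySem.List.pyRange n 1 (-1)).foldl (fun goal i =>
    let xi := PySem.List.pyGetD x (i-1) 0
    let yi := PySem.List.pyGetD y (i-1) 0
    (PySem.Dict.items goal).foldl (fun prev jg =>
      let prev := pvRelax prev jg.1 jg.2
      let prev := if 0 ≤ jg.1 - xi then pvRelax prev (jg.1 - xi) (jg.2 + yi) else prev
      if jg.1 + xi ≤ mx then pvRelax prev (jg.1 + xi) (jg.2 + yi) else prev)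
      PySem.Dict.empty) goal0
  -- max(goal.values()): goal is never empty inside Pre_, so the default is never taken
  (PySem.List.max? (PySem.Dict.values goal) (fun v => v)).getD 0

-- ===== PRECONDITION & SPEC =====
-- Pre_ excludes exactly the inputs on which A raises: empty x (ValueError in max), negative n or
-- all-negative x (IndexError at dp[n][0]), n ≥ 2 with x or y shorter than n (IndexError at x[i-1]/y[i-1]),
-- and a negative value among x[1..n-1] (IndexError at dp[i-1][j - x[i-1]] for large j).
def Pre_getMaxGain1 (n : Int) (x : List Int) (y : List Int) : Prop :=
  0 ≤ n ∧ x ≠ [] ∧ (2 ≤ n → (n ≤ (x.length : Int) ∧ n ≤ (y.length : Int))) ∧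
  0 ≤ (PySem.List.max? x (fun v => v)).getD 0 ∧
  ∀ v ∈ (x.take n.toNat).drop 1, 0 ≤ v
instance (n : Int) (x : List Int) (y : List Int) : Decidable (Pre_getMaxGain1 n x y) := by
  unfold Pre_getMaxGain1; infer_instance

def pvWitness_getMaxGain1 : Int × List Int × List Int := (2, [1, 2], [3, 4])

def Spec_getMaxGain1 (n : Int) (x : List Int) (y : List Int) (out : Int) : Prop := out = getMaxGain1_alt n x y
instance (n : Int) (x : List Int) (y : List Int) (out : Int) : Decidable (Spec_getMaxGain1 n x y out) := by unfold Spec_getMaxGain1; infer_instance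

-- ===== CLAIM (what is proved, stated in full; the proofs are below) =====
def Claim_equal_getMaxGain1 : Prop := ∀ (n : Int) (x : List Int) (y : List Int), Dom_getMaxGain1 n x y → Pre_getMaxGain1 n x y → Spec_getMaxGain1 n x y (getMaxGain1 n x y)

-- ===== LEMMAS AND PROOFS =====

-- the value A's pull recurrence assigns to cell j of the new row, from previous row p
def pullVal (mx xi yi : Int) (p : List Int) (j : Int) : Int :=
  max (max (PySem.List.pyGetD p j 0)
        (if 0 ≤ j - xi then PySem.List.pyGetD p (j - xi) 0 + yi else 0))
      (if j + xi ≤ mx then PySem.List.pyGetD p (j + xi) 0 + yi else 0)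

def pullStep (mx xi yi : Int) (p : List Int) : List Int :=
  (PySem.List.pyRange 0 (mx+1)).map (pullVal mx xi yi p)

-- row i of A's table, as the fold of the pull recurrence from the zero row
def frow (mx : Int) (x y : List Int) (i : Int) : List Int :=
  (PySem.List.pyRange 2 (i+1)).foldl
    (fun r t => pullStep mx (PySem.List.pyGetD x (t-1) 0) (PySem.List.pyGetD y (t-1) 0) r)
    (List.replicate (mx+1).toNat 0)

-- running max of h over a list of keys, from an explicit initial accumulator
def kfold (h : Int → Int) (l : List Int) (a : Int) : Int :=
  l.foldl (fun m k => max m (h k)) a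

-- max over a dict d of r[k] + d[k], from accumulator a
def dMax (r : List Int) (d : PySem.Dict Int Int) (a : Int) : Int :=
  kfold (fun k => PySem.List.pyGetD r k 0 + PySem.Dict.getD d k 0) d.keys a

lemma pySetD_map_pyRange {m t : Int} (f : Int → Int) (w : Int) (h0 : 0 ≤ t) (h1 : t < m) :
    PySem.List.pySetD ((PySem.List.pyRange 0 m).map f) t w
      = (PySem.List.pyRange 0 m).map (fun j => if j = t then w else f j) := by
  rw [PySem.List.pySetD_of_nonneg _ _ h0]
  apply List.ext_getElem
  · simp
  · intro k hk1 hk2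
    simp only [List.getElem_set, List.getElem_map, PySem.List.getElem_pyRange_one]
    have hk : k < (PySem.List.pyRange 0 m).length := by simpa using hk2
    have hklt : (k : Int) < m := by
      have := PySem.List.length_pyRange_one 0 m; omega
    by_cases h : t.toNat = k
    · have : (0 : Int) + (k : Int) = t := by omega
      simp [h, this]
    · have hne : ¬ ((k : Int) = t) := by omega
      simp [h, hne]

-- the state of row i of A's table after its inner loop has filled cells 0..c-1
def mixVal (mx xi yi : Int) (prev old : List Int) (c j : Int) : Int :=
  if j < c then pullVal mx xi yi prev j else PySem.List.pyGetD old j 0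

-- A's inner loop fills row i of the table with the pull recurrence applied to row i-1
lemma innerA (mx : Int) (x y : List Int) (i : Int) (dp : List (List Int))
    (hmx : 0 ≤ mx) (hi2 : 2 ≤ i) (hilt : i < (dp.length : Int))
    (hrows : ∀ r ∈ dp, r.length = (mx+1).toNat) :
    (PySem.List.pyRange 0 (mx+1)).foldl (fun dp j =>
      let tmp1 : Int := if 0 ≤ j - PySem.List.pyGetD x (i-1) 0 then
          PySem.List.pyGetD (PySem.List.pyGetD dp (i-1) []) (j - PySem.List.pyGetD x (i-1) 0) 0
            + PySem.List.pyGetD y (i-1) 0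
        else 0
      let tmp2 : Int := if j + PySem.List.pyGetD x (i-1) 0 ≤ mx then
          PySem.List.pyGetD (PySem.List.pyGetD dp (i-1) []) (j + PySem.List.pyGetD x (i-1) 0) 0
            + PySem.List.pyGetD y (i-1) 0
        else 0
      let dp := PySem.List.pySetD dp i (PySem.List.pySetD (PySem.List.pyGetD dp i []) j
        (max (max (PySem.List.pyGetD (PySem.List.pyGetD dp (i-1) []) j 0) tmp1) tmp2))
      if i = 1 ∧ j = 0 then
        PySem.List.pySetD dp i (PySem.List.pySetD (PySem.List.pyGetD dp i []) j 0)
      else dp) dp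
    = dp.set i.toNat (pullStep mx (PySem.List.pyGetD x (i-1) 0) (PySem.List.pyGetD y (i-1) 0)
        (PySem.List.pyGetD dp (i-1) [])) := by
  have h0i : (0 : Int) ≤ i := by omega
  have hiN : i.toNat < dp.length := by omega
  have hi1N : (i-1).toNat < dp.length := by omega
  have hrowi : PySem.List.pyGetD dp i [] = dp[i.toNat] :=
    PySem.List.pyGetD_eq_getElem dp [] h0i hilt
  have hleni : (dp[i.toNat].length : Int) = mx + 1 := by
    have := hrows dp[i.toNat] (List.getElem_mem hiN)
    omega
  set xi := PySem.List.pyGetD x (i-1) 0 with hxi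
  set yi := PySem.List.pyGetD y (i-1) 0 with hyi
  set prev := PySem.List.pyGetD dp (i-1) [] with hprevdef
  have hprevget : prev = dp[(i-1).toNat] :=
    PySem.List.pyGetD_eq_getElem dp [] (by omega) (by omega)
  have aux : ∀ c : Nat, (c : Int) ≤ mx + 1 →
      (PySem.List.pyRange 0 (c : Int)).foldl (fun dp j =>
        let tmp1 : Int := if 0 ≤ j - xi then
            PySem.List.pyGetD (PySem.List.pyGetD dp (i-1) []) (j - xi) 0 + yi
          else 0
        let tmp2 : Int := if j + xi ≤ mx then
            PySem.List.pyGetD (PySem.List.pyGetD dp (i-1) []) (j + xi) 0 + yi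
          else 0
        let dp := PySem.List.pySetD dp i (PySem.List.pySetD (PySem.List.pyGetD dp i []) j
          (max (max (PySem.List.pyGetD (PySem.List.pyGetD dp (i-1) []) j 0) tmp1) tmp2))
        if i = 1 ∧ j = 0 then
          PySem.List.pySetD dp i (PySem.List.pySetD (PySem.List.pyGetD dp i []) j 0)
        else dp) dp
      = dp.set i.toNat ((PySem.List.pyRange 0 (mx+1)).map
          (mixVal mx xi yi prev dp[i.toNat] (c : Int))) := by
    intro c
    induction c with
    | zero =>
      intro _
      rw [show ((0 : Nat) : Int) = 0 by norm_num, PySem.List.pyRange_one_eq_nil (le_refl 0),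
        List.foldl_nil]
      have hmap : (PySem.List.pyRange 0 (mx+1)).map (mixVal mx xi yi prev dp[i.toNat] 0)
          = dp[i.toNat] := by
        have h2 : (PySem.List.pyRange 0 (mx+1)).map (mixVal mx xi yi prev dp[i.toNat] 0)
            = (PySem.List.pyRange 0 (mx+1)).map (fun j => PySem.List.pyGetD dp[i.toNat] j 0) := by
          apply List.map_congr_left
          intro j hj
          have hjb := PySem.List.mem_pyRange_one.mp hj
          unfold mixVal
          rw [if_neg (by omega)]
        rw [h2]
        have h3 := PySem.List.map_pyGetD_pyRange_zero dp[i.toNat] 0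
        rw [show PySem.List.len dp[i.toNat] = mx + 1 by simpa [PySem.List.len] using hleni] at h3
        exact h3
      rw [hmap, List.set_getElem_self]
    | succ c ih =>
      intro hc
      have h0c : (0 : Int) ≤ (c : Int) := by positivity
      rw [show ((c + 1 : Nat) : Int) = (c : Int) + 1 by push_cast; ring,
        PySem.List.pyRange_one_succ_right h0c, List.foldl_append, ih (by omega),
        List.foldl_cons, List.foldl_nil]
      set R := (PySem.List.pyRange 0 (mx+1)).map (mixVal mx xi yi prev dp[i.toNat] (c : Int))
        with hR
      have hslen : (dp.set i.toNat R).length = dp.length := by simp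
      have hprevs : PySem.List.pyGetD (dp.set i.toNat R) (i-1) [] = prev := by
        rw [PySem.List.pyGetD_eq_getElem _ [] (by omega) (by omega)]
        rw [List.getElem_set_ne (by omega)]
        exact hprevget.symm
      have hrowis : PySem.List.pyGetD (dp.set i.toNat R) i [] = R := by
        rw [PySem.List.pyGetD_eq_getElem _ [] h0i (by omega)]
        exact List.getElem_set_self (by omega)
      simp only [hprevs, hrowis]
      rw [if_neg (by omega : ¬ (i = 1 ∧ (c : Int) = 0))]
      rw [hR, pySetD_map_pyRange (mixVal mx xi yi prev dp[i.toNat] (c : Int)) _ h0c (by omega)]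
      rw [PySem.List.pySetD_of_nonneg _ _ h0i, List.set_set]
      congr 1
      apply List.map_congr_left
      intro j hj
      have hjb := PySem.List.mem_pyRange_one.mp hj
      by_cases hjc : j = (c : Int)
      · subst hjc
        rw [if_pos rfl]
        have hmv : mixVal mx xi yi prev dp[i.toNat] ((c : Int) + 1) (c : Int)
            = pullVal mx xi yi prev (c : Int) := by
          unfold mixVal
          rw [if_pos (by omega)]
        rw [hmv]
        unfold pullVal
        rfl
      · rw [if_neg hjc]
        unfold mixVal
        by_cases hlt : j < (c : Int)
        · rw [if_pos hlt, if_pos (by omega)]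
        · rw [if_neg hlt, if_neg (by omega)]
  have hfin := aux (mx + 1).toNat (by omega)
  rw [show (((mx + 1).toNat : Nat) : Int) = mx + 1 by omega] at hfin
  rw [hfin]
  congr 1
  unfold pullStep
  apply List.map_congr_left
  intro j hj
  have hjb := PySem.List.mem_pyRange_one.mp hj
  unfold mixVal
  rw [if_pos (by omega)]

-- A's outer loop, started at any k, reads out as the fold of pullStep on the previous row
lemma outerA (mx : Int) (x y : List Int) (n : Int) (hmx : 0 ≤ mx) :
    ∀ (m : Nat) (k : Int), 2 ≤ k → k + (m : Int) = n + 1 → ∀ dp : List (List Int),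
    dp.length = (n+1).toNat → (∀ r ∈ dp, r.length = (mx+1).toNat) →
    PySem.List.pyGetD ((PySem.List.pyRange k (n+1)).foldl (fun dp i =>
      (PySem.List.pyRange 0 (mx+1)).foldl (fun dp j =>
        let tmp1 : Int := if 0 ≤ j - PySem.List.pyGetD x (i-1) 0 then
            PySem.List.pyGetD (PySem.List.pyGetD dp (i-1) []) (j - PySem.List.pyGetD x (i-1) 0) 0
              + PySem.List.pyGetD y (i-1) 0
          else 0
        let tmp2 : Int := if j + PySem.List.pyGetD x (i-1) 0 ≤ mx then
            PySem.List.pyGetD (PySem.List.pyGetD dp (i-1) []) (j + PySem.List.pyGetD x (i-1) 0) 0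
              + PySem.List.pyGetD y (i-1) 0
          else 0
        let dp := PySem.List.pySetD dp i (PySem.List.pySetD (PySem.List.pyGetD dp i []) j
          (max (max (PySem.List.pyGetD (PySem.List.pyGetD dp (i-1) []) j 0) tmp1) tmp2))
        if i = 1 ∧ j = 0 then
          PySem.List.pySetD dp i (PySem.List.pySetD (PySem.List.pyGetD dp i []) j 0)
        else dp) dp) dp) n []
    = (PySem.List.pyRange k (n+1)).foldl (fun r i =>
        pullStep mx (PySem.List.pyGetD x (i-1) 0) (PySem.List.pyGetD y (i-1) 0) r)
        (PySem.List.pyGetD dp (k-1) []) := by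
  intro m
  induction m with
  | zero =>
    intro k hk2 hkm dp hlen hrows
    have hk : k = n + 1 := by omega
    subst hk
    rw [PySem.List.pyRange_one_eq_nil (le_refl (n+1))]
    simp only [List.foldl_nil]
    norm_num
  | succ m ih =>
    intro k hk2 hkm dp hlen hrows
    have hkn : k < n + 1 := by omega
    rw [PySem.List.pyRange_one_cons hkn]
    simp only [List.foldl_cons]
    rw [innerA mx x y k dp hmx hk2 (by omega) hrows]
    have hlen' : (dp.set k.toNat (pullStep mx (PySem.List.pyGetD x (k-1) 0)
        (PySem.List.pyGetD y (k-1) 0) (PySem.List.pyGetD dp (k-1) []))).length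
        = (n+1).toNat := by simp [hlen]
    have hrows' : ∀ r ∈ dp.set k.toNat (pullStep mx (PySem.List.pyGetD x (k-1) 0)
        (PySem.List.pyGetD y (k-1) 0) (PySem.List.pyGetD dp (k-1) [])),
        r.length = (mx+1).toNat := by
      intro r hr
      rcases List.mem_or_eq_of_mem_set hr with h | h
      · exact hrows r h
      · rw [h]
        unfold pullStep
        rw [List.length_map, PySem.List.length_pyRange_one]
        omega
    have := ih (k+1) (by omega) (by omega) _ hlen' hrows'
    rw [show k + 1 - 1 = k by ring] at this
    rw [this]
    have hread : PySem.List.pyGetD (dp.set k.toNat (pullStep mx (PySem.List.pyGetD x (k-1) 0)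
        (PySem.List.pyGetD y (k-1) 0) (PySem.List.pyGetD dp (k-1) []))) k []
        = pullStep mx (PySem.List.pyGetD x (k-1) 0) (PySem.List.pyGetD y (k-1) 0)
            (PySem.List.pyGetD dp (k-1) []) := by
      rw [PySem.List.pyGetD_eq_getElem _ [] (by omega) (by simp [hlen]; omega)]
      exact List.getElem_set_self (by omega)
    rw [hread]

-- a value of x at a position 1..n-1 lies in the window (x.take n)[1:]
lemma mem_window (x : List Int) (nN t : Nat) (h1 : 1 ≤ t) (h2 : t < nN) (h3 : nN ≤ x.length) :
    x[t]'(by omega) ∈ (x.take nN).drop 1 := by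
  have hlen : ((x.take nN).drop 1).length = nN - 1 := by
    simp [List.length_take]
    omega
  rw [List.mem_iff_getElem]
  refine ⟨t - 1, by omega, ?_⟩
  rw [List.getElem_drop, List.getElem_take]
  have h14 : 1 + (t - 1) = t := by omega
  simp only [h14]

-- ===== B-side lemmas =====

lemma pyGetD_replicate_zero (m : Nat) (k : Int) :
    PySem.List.pyGetD (List.replicate m (0:Int)) k 0 = 0 := by
  by_cases h : PySem.Raise.InRange (List.replicate m (0:Int)).length k
  · exact List.eq_of_mem_replicate (PySem.List.pyGetD_mem _ _ (h := h))
  · exact PySem.List.pyGetD_of_none _ _ _ ((PySem.List.pyGet?_eq_none_iff _ _).mpr h)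

lemma kfold_init (h : Int → Int) (l : List Int) (a z : Int) :
    kfold h l (max a z) = max (kfold h l a) z := by
  induction l generalizing a with
  | nil => rfl
  | cons x t ih =>
    show kfold h t (max (max a z) (h x)) = max (kfold h t (max a (h x))) z
    rw [show max (max a z) (h x) = max (max a (h x)) z by omega, ih]

lemma le_kfold (h : Int → Int) (l : List Int) (a : Int) : a ≤ kfold h l a := by
  induction l generalizing a with
  | nil => exact le_refl a
  | cons x t ih =>
    calc a ≤ max a (h x) := le_max_left _ _
    _ ≤ kfold h t (max a (h x)) := ih _

lemma mem_le_kfold (h : Int → Int) {l : List Int} {k : Int} (hk : k ∈ l) (a : Int) :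
    h k ≤ kfold h l a := by
  induction l generalizing a with
  | nil => cases hk
  | cons x t ih =>
    rcases List.mem_cons.mp hk with rfl | hk'
    · calc h k ≤ max a (h k) := le_max_right _ _
      _ ≤ kfold h t (max a (h k)) := le_kfold _ _ _
    · exact ih hk' _

lemma kfold_congr {h h' : Int → Int} {l : List Int} (hc : ∀ k ∈ l, h k = h' k) (a : Int) :
    kfold h l a = kfold h' l a := by
  induction l generalizing a with
  | nil => rfl
  | cons x t ih =>
    show kfold h t (max a (h x)) = kfold h' t (max a (h' x))
    rw [hc x (by simp)]
    exact ih (fun k hk => hc k (by simp [hk])) _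

lemma kfold_update (h : Int → Int) {l : List Int} {k : Int} (hl : l.Nodup) (hk : k ∈ l)
    {z : Int} (hz : h k ≤ z) (a : Int) :
    kfold (fun j => if j = k then z else h j) l a = max (kfold h l a) z := by
  induction l generalizing a with
  | nil => cases hk
  | cons x t ih =>
    have hx : x ∉ t := (List.nodup_cons.mp hl).1
    have ht : t.Nodup := (List.nodup_cons.mp hl).2
    rcases List.mem_cons.mp hk with rfl | hk'
    · show kfold _ t (max a (if k = k then z else h k)) = max (kfold h t (max a (h k))) z
      rw [if_pos rfl]
      rw [kfold_congr (h := fun j => if j = k then z else h j) (h' := h)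
        (fun j hj => by show (if j = k then z else h j) = h j; rw [if_neg (by rintro rfl; exact hx hj)]) _]
      rw [kfold_init, kfold_init]
      omega
    · have hxk : x ≠ k := by rintro rfl; exact hx hk'
      show kfold _ t (max a (if x = k then z else h x)) = max (kfold h t (max a (h x))) z
      rw [if_neg hxk]
      exact ih ht hk' _



lemma relax_keys (d : PySem.Dict Int Int) (k v : Int) :
    (pvRelax d k v).keys = if d.contains k = true then d.keys else d.keys ++ [k] := by
  unfold pvRelax
  cases hg : PySem.Dict.get? d k with
  | none =>
    have hc : d.contains k = false := by rwa [PySem.Dict.get?_eq_none_iff_contains] at hg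
    rw [if_neg (by simp [hc])]
    exact PySem.Dict.keys_insert_of_not_contains d v hc
  | some w =>
    have hc : d.contains k = true := by rw [PySem.Dict.contains_eq_isSome_get?, hg]; rfl
    rw [if_pos hc]
    show (if w < v then PySem.Dict.insert d k v else d).keys = d.keys
    by_cases hlt : w < v
    · rw [if_pos hlt]
      exact PySem.Dict.keys_insert_of_contains d v hc
    · rw [if_neg hlt]

lemma relax_nodup {d : PySem.Dict Int Int} (hd : d.keys.Nodup) (k v : Int) :
    (pvRelax d k v).keys.Nodup := by
  rw [relax_keys]
  by_cases hc : d.contains k = true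
  · rw [if_pos hc]; exact hd
  · rw [if_neg hc]
    have hk : k ∉ d.keys := by
      intro hm
      exact hc ((PySem.Dict.contains_iff_mem_keys _ _).mpr hm)
    rw [List.nodup_append]
    refine ⟨hd, List.nodup_singleton _, ?_⟩
    intro a ha b hb
    rw [List.mem_singleton] at hb
    subst hb
    exact fun h => hk (h ▸ ha)

lemma mem_relax_keys {d : PySem.Dict Int Int} {k' : Int} (k v : Int) :
    k' ∈ (pvRelax d k v).keys ↔ k' ∈ d.keys ∨ k' = k := by
  rw [relax_keys]
  by_cases hc : d.contains k = true
  · rw [if_pos hc]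
    constructor
    · exact fun h => Or.inl h
    · rintro (h | rfl)
      · exact h
      · exact (PySem.Dict.contains_iff_mem_keys _ _).mp hc
  · rw [if_neg hc]; simp

lemma relax_dMax (r : List Int) {d : PySem.Dict Int Int} (hd : d.keys.Nodup) (k v a : Int) :
    dMax r (pvRelax d k v) a = max (dMax r d a) (PySem.List.pyGetD r k 0 + v) := by
  cases hg : PySem.Dict.get? d k with
  | none =>
    have hc : d.contains k = false := by rwa [PySem.Dict.get?_eq_none_iff_contains] at hg
    have hkk : k ∉ d.keys := fun hm => by
      rw [(PySem.Dict.contains_iff_mem_keys _ _).mpr hm] at hc; cases hc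
    have hrel : pvRelax d k v = PySem.Dict.insert d k v := by simp only [pvRelax, hg]
    unfold dMax
    rw [hrel, PySem.Dict.keys_insert_of_not_contains d v hc]
    show kfold (fun j => PySem.List.pyGetD r j 0 + (PySem.Dict.insert d k v).getD j 0)
        (d.keys ++ [k]) a = _
    unfold kfold
    rw [List.foldl_append, List.foldl_cons, List.foldl_nil]
    show max (kfold (fun j => PySem.List.pyGetD r j 0 + (PySem.Dict.insert d k v).getD j 0)
        d.keys a) (PySem.List.pyGetD r k 0 + (PySem.Dict.insert d k v).getD k 0) = _
    rw [kfold_congr (h := fun j => PySem.List.pyGetD r j 0 + (PySem.Dict.insert d k v).getD j 0)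
      (h' := fun j => PySem.List.pyGetD r j 0 + d.getD j 0)
      (fun j hj => by
        show PySem.List.pyGetD r j 0 + (PySem.Dict.insert d k v).getD j 0
          = PySem.List.pyGetD r j 0 + d.getD j 0
        rw [PySem.Dict.getD_insert_of_ne d v 0 (by rintro rfl; exact hkk hj)]) a]
    rw [PySem.Dict.getD_insert_self]
    rfl
  | some w =>
    have hc : d.contains k = true := by rw [PySem.Dict.contains_eq_isSome_get?, hg]; rfl
    have hkk : k ∈ d.keys := (PySem.Dict.contains_iff_mem_keys _ _).mp hc
    have hw : d.getD k 0 = w := PySem.Dict.getD_of_get?_eq_some d 0 hg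
    by_cases hlt : w < v
    · have hrel : pvRelax d k v = PySem.Dict.insert d k v := by
        simp only [pvRelax, hg]; exact if_pos hlt
      unfold dMax
      rw [hrel, PySem.Dict.keys_insert_of_contains d v hc]
      rw [kfold_congr (h := fun j => PySem.List.pyGetD r j 0 + (PySem.Dict.insert d k v).getD j 0)
        (h' := fun j => if j = k then PySem.List.pyGetD r k 0 + v
            else PySem.List.pyGetD r j 0 + d.getD j 0)
        (fun j hj => by
          show PySem.List.pyGetD r j 0 + (PySem.Dict.insert d k v).getD j 0
            = if j = k then PySem.List.pyGetD r k 0 + v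
              else PySem.List.pyGetD r j 0 + d.getD j 0
          rw [PySem.Dict.getD_insert d k j v 0]
          by_cases hj' : j = k
          · subst hj'; rw [if_pos rfl, if_pos rfl]
          · rw [if_neg hj', if_neg hj']) a]
      exact kfold_update _ hd hkk (by rw [hw]; omega) a
    · have hrel : pvRelax d k v = d := by simp only [pvRelax, hg]; exact if_neg hlt
      rw [hrel]
      have hle : PySem.List.pyGetD r k 0 + v
          ≤ kfold (fun j => PySem.List.pyGetD r j 0 + d.getD j 0) d.keys a := by
        calc PySem.List.pyGetD r k 0 + v ≤ PySem.List.pyGetD r k 0 + d.getD k 0 := by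
              rw [hw]; omega
        _ ≤ _ := mem_le_kfold _ hkk a
      unfold dMax
      omega




lemma pullStep_props (mx xi yi : Int) (p : List Int) (hmx : 0 ≤ mx)
    (hp : p.length = (mx+1).toNat) (hpn : ∀ e ∈ p, 0 ≤ e) :
    (pullStep mx xi yi p).length = (mx+1).toNat ∧ ∀ e ∈ pullStep mx xi yi p, 0 ≤ e := by
  constructor
  · unfold pullStep
    rw [List.length_map, PySem.List.length_pyRange_one]
    omega
  · intro e he
    rcases List.mem_map.mp he with ⟨j, hj, hje⟩
    have hjb := PySem.List.mem_pyRange_one.mp hj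
    have h0 : 0 ≤ PySem.List.pyGetD p j 0 := by
      apply hpn
      apply PySem.List.pyGetD_mem
      show PySem.Raise.InRange p.length j
      unfold PySem.Raise.InRange
      omega
    rw [← hje]
    unfold pullVal
    have h1 := le_max_left (PySem.List.pyGetD p j 0)
      (if 0 ≤ j - xi then PySem.List.pyGetD p (j - xi) 0 + yi else 0)
    have h2 := le_max_left
      (max (PySem.List.pyGetD p j 0)
        (if 0 ≤ j - xi then PySem.List.pyGetD p (j - xi) 0 + yi else 0))
      (if j + xi ≤ mx then PySem.List.pyGetD p (j + xi) 0 + yi else 0)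
    omega

lemma frow_props (mx : Int) (x y : List Int) (hmx : 0 ≤ mx) (i : Int) :
    (frow mx x y i).length = (mx+1).toNat ∧ ∀ e ∈ frow mx x y i, 0 ≤ e := by
  unfold frow
  generalize PySem.List.pyRange 2 (i+1) = l
  induction l using List.reverseRecOn with
  | nil =>
    constructor
    · simp
    · intro e he
      rw [List.eq_of_mem_replicate he]
  | append_singleton t b ih =>
    rw [List.foldl_append, List.foldl_cons, List.foldl_nil]
    exact pullStep_props mx _ _ _ hmx ih.1 ih.2

lemma frow_succ (mx : Int) (x y : List Int) {i : Int} (hi : 2 ≤ i) :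
    frow mx x y i = pullStep mx (PySem.List.pyGetD x (i-1) 0) (PySem.List.pyGetD y (i-1) 0)
      (frow mx x y (i-1)) := by
  unfold frow
  rw [show i - 1 + 1 = i by ring, PySem.List.pyRange_one_succ_right hi, List.foldl_append,
    List.foldl_cons, List.foldl_nil]

lemma frow_one (mx : Int) (x y : List Int) :
    frow mx x y 1 = List.replicate (mx+1).toNat 0 := by
  unfold frow
  rw [show (1:Int) + 1 = 2 by norm_num, PySem.List.pyRange_one_eq_nil (le_refl 2), List.foldl_nil]

lemma pullStep_get (mx xi yi : Int) (p : List Int) {j : Int} (h0 : 0 ≤ j) (h1 : j ≤ mx) :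
    PySem.List.pyGetD (pullStep mx xi yi p) j 0 = pullVal mx xi yi p j := by
  unfold pullStep
  exact PySem.List.pyGetD_map_pyRange_of_nonneg _ (mx+1) j 0 h0 (by omega)

lemma stepB (mx xi yi : Int) (p : List Int) (hxi : 0 ≤ xi)
    (hp : p.length = (mx+1).toNat) (hpn : ∀ e ∈ p, 0 ≤ e)
    (d : PySem.Dict Int Int) (hd : d.keys.Nodup) (jv : Int × Int)
    (hj0 : 0 ≤ jv.1) (hj1 : jv.1 ≤ mx) (a : Int) :
    ∀ D3 : PySem.Dict Int Int,
    D3 = (if jv.1 + xi ≤ mx then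
        pvRelax (if 0 ≤ jv.1 - xi then pvRelax (pvRelax d jv.1 jv.2) (jv.1 - xi) (jv.2 + yi)
          else pvRelax d jv.1 jv.2) (jv.1 + xi) (jv.2 + yi)
      else (if 0 ≤ jv.1 - xi then pvRelax (pvRelax d jv.1 jv.2) (jv.1 - xi) (jv.2 + yi)
          else pvRelax d jv.1 jv.2)) →
    dMax p D3 a = max (dMax p d a) (PySem.List.pyGetD (pullStep mx xi yi p) jv.1 0 + jv.2)
    ∧ D3.keys.Nodup
    ∧ (∀ k ∈ D3.keys, k ∈ d.keys ∨ (0 ≤ k ∧ k ≤ mx))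
    ∧ (∀ k ∈ d.keys, k ∈ D3.keys)
    ∧ jv.1 ∈ D3.keys := by
  intro D3 hD3
  have h0 : 0 ≤ PySem.List.pyGetD p jv.1 0 := by
    apply hpn
    apply PySem.List.pyGetD_mem
    show PySem.Raise.InRange p.length jv.1
    unfold PySem.Raise.InRange
    omega
  rw [pullStep_get mx xi yi p hj0 hj1]
  have hn1 : (pvRelax d jv.1 jv.2).keys.Nodup := relax_nodup hd _ _
  unfold pullVal
  by_cases c1 : 0 ≤ jv.1 - xi
  · have hn2 : (pvRelax (pvRelax d jv.1 jv.2) (jv.1 - xi) (jv.2 + yi)).keys.Nodup :=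
      relax_nodup hn1 _ _
    by_cases c2 : jv.1 + xi ≤ mx
    · rw [if_pos c2, if_pos c1] at hD3
      subst hD3
      refine ⟨?_, relax_nodup hn2 _ _, ?_, ?_, ?_⟩
      · rw [relax_dMax p hn2, relax_dMax p hn1, relax_dMax p hd, if_pos c1, if_pos c2]
        omega
      · intro k hk
        rcases (mem_relax_keys _ _).mp hk with hk | rfl
        · rcases (mem_relax_keys _ _).mp hk with hk | rfl
          · rcases (mem_relax_keys _ _).mp hk with hk | rfl
            · exact Or.inl hk
            · exact Or.inr (by omega)
          · exact Or.inr (by omega)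
        · exact Or.inr (by omega)
      · intro k hk
        exact (mem_relax_keys _ _).mpr (Or.inl ((mem_relax_keys _ _).mpr
          (Or.inl ((mem_relax_keys _ _).mpr (Or.inl hk)))))
      · exact (mem_relax_keys _ _).mpr (Or.inl ((mem_relax_keys _ _).mpr
          (Or.inl ((mem_relax_keys _ _).mpr (Or.inr rfl)))))
    · rw [if_neg c2, if_pos c1] at hD3
      subst hD3
      refine ⟨?_, hn2, ?_, ?_, ?_⟩
      · rw [relax_dMax p hn1, relax_dMax p hd, if_pos c1, if_neg c2]
        omega
      · intro k hk
        rcases (mem_relax_keys _ _).mp hk with hk | rfl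
        · rcases (mem_relax_keys _ _).mp hk with hk | rfl
          · exact Or.inl hk
          · exact Or.inr (by omega)
        · exact Or.inr (by omega)
      · intro k hk
        exact (mem_relax_keys _ _).mpr (Or.inl ((mem_relax_keys _ _).mpr (Or.inl hk)))
      · exact (mem_relax_keys _ _).mpr (Or.inl ((mem_relax_keys _ _).mpr (Or.inr rfl)))
  · by_cases c2 : jv.1 + xi ≤ mx
    · rw [if_pos c2, if_neg c1] at hD3
      subst hD3
      refine ⟨?_, relax_nodup hn1 _ _, ?_, ?_, ?_⟩
      · rw [relax_dMax p hn1, relax_dMax p hd, if_neg c1, if_pos c2]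
        omega
      · intro k hk
        rcases (mem_relax_keys _ _).mp hk with hk | rfl
        · rcases (mem_relax_keys _ _).mp hk with hk | rfl
          · exact Or.inl hk
          · exact Or.inr (by omega)
        · exact Or.inr (by omega)
      · intro k hk
        exact (mem_relax_keys _ _).mpr (Or.inl ((mem_relax_keys _ _).mpr (Or.inl hk)))
      · exact (mem_relax_keys _ _).mpr (Or.inl ((mem_relax_keys _ _).mpr (Or.inr rfl)))
    · rw [if_neg c2, if_neg c1] at hD3
      subst hD3
      refine ⟨?_, hn1, ?_, ?_, ?_⟩
      · rw [relax_dMax p hd, if_neg c1, if_neg c2]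
        omega
      · intro k hk
        rcases (mem_relax_keys _ _).mp hk with hk | rfl
        · exact Or.inl hk
        · exact Or.inr (by omega)
      · intro k hk
        exact (mem_relax_keys _ _).mpr (Or.inl hk)
      · exact (mem_relax_keys _ _).mpr (Or.inr rfl)

lemma innerB (mx xi yi : Int) (p : List Int) (hxi : 0 ≤ xi)
    (hp : p.length = (mx+1).toNat) (hpn : ∀ e ∈ p, 0 ≤ e) :
    ∀ (L : List (Int × Int)) (d : PySem.Dict Int Int) (a : Int),
    d.keys.Nodup → (∀ k ∈ d.keys, 0 ≤ k ∧ k ≤ mx) → (∀ jv ∈ L, 0 ≤ jv.1 ∧ jv.1 ≤ mx) →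
    dMax p (L.foldl (fun prev jg =>
        let prev := pvRelax prev jg.1 jg.2
        let prev := if 0 ≤ jg.1 - xi then pvRelax prev (jg.1 - xi) (jg.2 + yi) else prev
        if jg.1 + xi ≤ mx then pvRelax prev (jg.1 + xi) (jg.2 + yi) else prev) d) a
      = L.foldl (fun m jv => max m (PySem.List.pyGetD (pullStep mx xi yi p) jv.1 0 + jv.2))
          (dMax p d a)
    ∧ (L.foldl (fun prev jg =>
        let prev := pvRelax prev jg.1 jg.2
        let prev := if 0 ≤ jg.1 - xi then pvRelax prev (jg.1 - xi) (jg.2 + yi) else prev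
        if jg.1 + xi ≤ mx then pvRelax prev (jg.1 + xi) (jg.2 + yi) else prev) d).keys.Nodup
    ∧ (∀ k ∈ (L.foldl (fun prev jg =>
        let prev := pvRelax prev jg.1 jg.2
        let prev := if 0 ≤ jg.1 - xi then pvRelax prev (jg.1 - xi) (jg.2 + yi) else prev
        if jg.1 + xi ≤ mx then pvRelax prev (jg.1 + xi) (jg.2 + yi) else prev) d).keys,
        0 ≤ k ∧ k ≤ mx)
    ∧ (∀ k ∈ d.keys, k ∈ (L.foldl (fun prev jg =>
        let prev := pvRelax prev jg.1 jg.2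
        let prev := if 0 ≤ jg.1 - xi then pvRelax prev (jg.1 - xi) (jg.2 + yi) else prev
        if jg.1 + xi ≤ mx then pvRelax prev (jg.1 + xi) (jg.2 + yi) else prev) d).keys)
    ∧ (∀ jv ∈ L, jv.1 ∈ (L.foldl (fun prev jg =>
        let prev := pvRelax prev jg.1 jg.2
        let prev := if 0 ≤ jg.1 - xi then pvRelax prev (jg.1 - xi) (jg.2 + yi) else prev
        if jg.1 + xi ≤ mx then pvRelax prev (jg.1 + xi) (jg.2 + yi) else prev) d).keys) := by
  intro L
  induction L with
  | nil =>
    intro d a hd hr _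
    exact ⟨rfl, hd, hr, fun k hk => hk, fun jv h => absurd h (List.not_mem_nil)⟩
  | cons jv L' ih =>
    intro d a hd hr hL
    rw [List.foldl_cons, List.foldl_cons]
    have hjb := hL jv (List.mem_cons_self)
    have hstep := stepB mx xi yi p hxi hp hpn d hd jv hjb.1 hjb.2 a
      ((fun prev jg =>
        let prev := pvRelax prev jg.1 jg.2
        let prev := if 0 ≤ jg.1 - xi then pvRelax prev (jg.1 - xi) (jg.2 + yi) else prev
        if jg.1 + xi ≤ mx then pvRelax prev (jg.1 + xi) (jg.2 + yi) else prev) d jv) rfl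
    obtain ⟨heq, hnd3, hr3, hpres3, hjmem⟩ := hstep
    have hr3' : ∀ k ∈ ((fun prev jg =>
        let prev := pvRelax prev jg.1 jg.2
        let prev := if 0 ≤ jg.1 - xi then pvRelax prev (jg.1 - xi) (jg.2 + yi) else prev
        if jg.1 + xi ≤ mx then pvRelax prev (jg.1 + xi) (jg.2 + yi) else prev) d jv).keys,
        0 ≤ k ∧ k ≤ mx := by
      intro k hk
      rcases hr3 k hk with h | h
      · exact hr k h
      · exact h
    have hih := ih _ a hnd3 hr3' (fun jv' h => hL jv' (List.mem_cons_of_mem _ h))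
    obtain ⟨ihq, ihnd, ihr, ihpres, ihmem⟩ := hih
    refine ⟨?_, ihnd, ihr, ?_, ?_⟩
    · rw [ihq, heq]
    · intro k hk
      exact ihpres k (hpres3 k hk)
    · intro jv' hjv'
      rcases List.mem_cons.mp hjv' with rfl | h
      · exact ihpres _ hjmem
      · exact ihmem jv' h

lemma outerB (mx : Int) (x y : List Int) (n : Int) (hmx : 0 ≤ mx)
    (hx : ∀ i : Int, 2 ≤ i → i ≤ n → 0 ≤ PySem.List.pyGetD x (i-1) 0) :
    ∀ (m : Nat) (i : Int), i = (m : Int) + 1 → i ≤ n →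
    ∀ (g : PySem.Dict Int Int) (a : Int),
    g.keys.Nodup → (∀ k ∈ g.keys, 0 ≤ k ∧ k ≤ mx) → g.keys ≠ [] →
    (dMax (frow mx x y 1) ((PySem.List.pyRange i 1 (-1)).foldl (fun goal i =>
        let xi := PySem.List.pyGetD x (i-1) 0
        let yi := PySem.List.pyGetD y (i-1) 0
        (PySem.Dict.items goal).foldl (fun prev jg =>
          let prev := pvRelax prev jg.1 jg.2
          let prev := if 0 ≤ jg.1 - xi then pvRelax prev (jg.1 - xi) (jg.2 + yi) else prev
          if jg.1 + xi ≤ mx then pvRelax prev (jg.1 + xi) (jg.2 + yi) else prev)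
          PySem.Dict.empty) g) a
       = dMax (frow mx x y i) g a)
    ∧ ((PySem.List.pyRange i 1 (-1)).foldl (fun goal i =>
        let xi := PySem.List.pyGetD x (i-1) 0
        let yi := PySem.List.pyGetD y (i-1) 0
        (PySem.Dict.items goal).foldl (fun prev jg =>
          let prev := pvRelax prev jg.1 jg.2
          let prev := if 0 ≤ jg.1 - xi then pvRelax prev (jg.1 - xi) (jg.2 + yi) else prev
          if jg.1 + xi ≤ mx then pvRelax prev (jg.1 + xi) (jg.2 + yi) else prev)
          PySem.Dict.empty) g).keys.Nodup
    ∧ ((PySem.List.pyRange i 1 (-1)).foldl (fun goal i =>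
        let xi := PySem.List.pyGetD x (i-1) 0
        let yi := PySem.List.pyGetD y (i-1) 0
        (PySem.Dict.items goal).foldl (fun prev jg =>
          let prev := pvRelax prev jg.1 jg.2
          let prev := if 0 ≤ jg.1 - xi then pvRelax prev (jg.1 - xi) (jg.2 + yi) else prev
          if jg.1 + xi ≤ mx then pvRelax prev (jg.1 + xi) (jg.2 + yi) else prev)
          PySem.Dict.empty) g).keys ≠ [] := by
  intro m
  induction m with
  | zero =>
    intro i hi _ g a hnd hr hne
    have h1 : i = 1 := by omega
    subst h1
    rw [PySem.List.pyRange_neg_one_eq_nil (by omega)]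
    exact ⟨rfl, hnd, hne⟩
  | succ m ihm =>
    intro i hi hin g a hnd hr hne
    have h2i : 2 ≤ i := by omega
    rw [PySem.List.pyRange_neg_one_cons (by omega : (1:Int) < i), List.foldl_cons]
    set xi := PySem.List.pyGetD x (i-1) 0 with hxidef
    set yi := PySem.List.pyGetD y (i-1) 0 with hyidef
    have hxi : 0 ≤ xi := hx i h2i hin
    have fp := frow_props mx x y hmx (i-1)
    have hLb : ∀ jv ∈ g.items, 0 ≤ jv.1 ∧ jv.1 ≤ mx := by
      intro jv hjv
      exact hr jv.1 (PySem.Dict.mem_keys_of_mem_items _ hjv)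
    have hinner := innerB mx xi yi (frow mx x y (i-1)) hxi fp.1 fp.2 g.items
      PySem.Dict.empty a (by rw [PySem.Dict.keys_empty]; exact List.nodup_nil)
      (by rw [PySem.Dict.keys_empty]; intro k hk; cases hk) hLb
    obtain ⟨hq, hnd1, hr1, _, hmem1⟩ := hinner
    have hitems_ne : g.items ≠ [] := by
      intro h
      apply hne
      show g.items.map Prod.fst = []
      rw [h]; rfl
    obtain ⟨jv0, L0, hL0⟩ := List.exists_cons_of_ne_nil hitems_ne
    have hne1 : ((g.items).foldl (fun prev jg =>
          let prev := pvRelax prev jg.1 jg.2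
          let prev := if 0 ≤ jg.1 - xi then pvRelax prev (jg.1 - xi) (jg.2 + yi) else prev
          if jg.1 + xi ≤ mx then pvRelax prev (jg.1 + xi) (jg.2 + yi) else prev)
          PySem.Dict.empty).keys ≠ [] := by
      apply List.ne_nil_of_mem (a := jv0.1)
      apply hmem1
      rw [hL0]; exact List.mem_cons_self
    have hihm := ihm (i-1) (by omega) (by omega) _ a hnd1 hr1 hne1
    refine ⟨?_, hihm.2.1, hihm.2.2⟩
    rw [hihm.1, hq]
    have hempty : dMax (frow mx x y (i-1)) PySem.Dict.empty a = a := by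
      unfold dMax
      rw [PySem.Dict.keys_empty]
      rfl
    rw [hempty]
    rw [frow_succ mx x y h2i, ← hxidef, ← hyidef]
    rw [PySem.Dict.items_eq_map_keys g hnd 0, List.foldl_map]
    rfl

theorem getMaxGain1_spec' (n : Int) (x : List Int) (y : List Int)
    (hpre : Pre_getMaxGain1 n x y) : getMaxGain1 n x y = getMaxGain1_alt n x y := by
  obtain ⟨hn0, hxne, hlen2, hmx0, hwin⟩ := hpre
  unfold getMaxGain1 getMaxGain1_alt
  simp only []
  set mx := (PySem.List.max? x (fun v => v)).getD 0 with hmxdef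
  -- facts about the initial dict {0: 0}
  have hk0 : (PySem.Dict.insert (PySem.Dict.empty : PySem.Dict Int Int) 0 0).keys = [0] := by
    rw [PySem.Dict.keys_insert_of_not_contains PySem.Dict.empty 0 (PySem.Dict.contains_empty 0),
      PySem.Dict.keys_empty]
    rfl
  by_cases hn2 : 2 ≤ n
  · -- A side reduces to reading cell 0 of the fold of pullStep
    have hdplen : ((PySem.List.pyRange 0 (n+1)).map
        (fun _ => List.replicate (mx+1).toNat (0:Int))).length = (n+1).toNat := by
      rw [List.length_map, PySem.List.length_pyRange_one]
      omega
    have hdprows : ∀ r ∈ (PySem.List.pyRange 0 (n+1)).map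
        (fun _ => List.replicate (mx+1).toNat (0:Int)), r.length = (mx+1).toNat := by
      intro r hr
      rcases List.mem_map.mp hr with ⟨a, _, ha⟩
      rw [← ha, List.length_replicate]
    have hA := outerA mx x y n hmx0 (n-1).toNat 2 (by omega) (by omega) _ hdplen hdprows
    rw [hA]
    have hz : PySem.List.pyGetD ((PySem.List.pyRange 0 (n+1)).map
        (fun _ => List.replicate (mx+1).toNat (0:Int))) (2-1) []
        = List.replicate (mx+1).toNat (0:Int) := by
      rw [show (2:Int) - 1 = 1 by norm_num]
      exact PySem.List.pyGetD_map_pyRange_of_nonneg _ (n+1) 1 [] (by omega) (by omega)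
    rw [hz]
    show PySem.List.pyGetD (frow mx x y n) 0 0 = _
    set Ans := PySem.List.pyGetD (frow mx x y n) 0 0 with hAns
    -- interior x values are nonnegative
    have hxnn : ∀ i : Int, 2 ≤ i → i ≤ n → 0 ≤ PySem.List.pyGetD x (i-1) 0 := by
      intro i h2 hilen
      have hxl : n ≤ (x.length : Int) := (hlen2 hn2).1
      rw [PySem.List.pyGetD_eq_getElem x 0 (by omega) (by omega)]
      apply hwin
      apply mem_window x n.toNat (i-1).toNat (by omega) (by omega) (by omega)
    -- B side via the backward invariant
    have hOB := outerB mx x y n hmx0 hxnn (n-1).toNat n (by omega) (le_refl n)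
      (PySem.Dict.insert PySem.Dict.empty 0 0)
    have hnd0 : (PySem.Dict.insert (PySem.Dict.empty : PySem.Dict Int Int) 0 0).keys.Nodup := by
      rw [hk0]; exact List.nodup_singleton 0
    have hr0 : ∀ k ∈ (PySem.Dict.insert (PySem.Dict.empty : PySem.Dict Int Int) 0 0).keys,
        0 ≤ k ∧ k ≤ mx := by
      rw [hk0]
      intro k hk
      rw [List.mem_singleton] at hk
      omega
    have hne0 : (PySem.Dict.insert (PySem.Dict.empty : PySem.Dict Int Int) 0 0).keys ≠ [] := by
      rw [hk0]; exact List.cons_ne_nil 0 []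
    have hOB' := fun a => hOB a hnd0 hr0 hne0
    obtain ⟨Gnd, Gne⟩ := (hOB' 0).2
    -- the right-hand side of the invariant is max a Ans
    have hrhs : ∀ a : Int, dMax (frow mx x y n)
        (PySem.Dict.insert PySem.Dict.empty 0 0) a = max a Ans := by
      intro a
      unfold dMax
      rw [hk0]
      unfold kfold
      rw [List.foldl_cons, List.foldl_nil]
      show max a (PySem.List.pyGetD (frow mx x y n) 0 0
        + (PySem.Dict.insert PySem.Dict.empty 0 0).getD 0 0) = max a Ans
      rw [PySem.Dict.getD_insert_self, ← hAns, add_zero]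
    -- the left-hand side is the running max over the final values
    set G := (PySem.List.pyRange n 1 (-1)).foldl (fun goal i =>
        let xi := PySem.List.pyGetD x (i-1) 0
        let yi := PySem.List.pyGetD y (i-1) 0
        (PySem.Dict.items goal).foldl (fun prev jg =>
          let prev := pvRelax prev jg.1 jg.2
          let prev := if 0 ≤ jg.1 - xi then pvRelax prev (jg.1 - xi) (jg.2 + yi) else prev
          if jg.1 + xi ≤ mx then pvRelax prev (jg.1 + xi) (jg.2 + yi) else prev)
          PySem.Dict.empty) (PySem.Dict.insert PySem.Dict.empty 0 0) with hGdef
    have hlhs : ∀ a : Int, dMax (frow mx x y 1) G a = kfold (fun v => v) G.values a := by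
      intro a
      unfold dMax
      rw [frow_one]
      rw [kfold_congr (h := fun k => PySem.List.pyGetD (List.replicate (mx+1).toNat 0) k 0
          + G.getD k 0) (h' := fun k => G.getD k 0)
        (fun k _ => by
          show PySem.List.pyGetD (List.replicate (mx+1).toNat 0) k 0 + G.getD k 0 = G.getD k 0
          rw [pyGetD_replicate_zero, zero_add]) a]
      rw [PySem.Dict.values_eq_map_keys G Gnd 0]
      unfold kfold
      rw [List.foldl_map]
    have hvne : G.values ≠ [] := by
      rw [PySem.Dict.values_eq_map_keys G Gnd 0]
      intro h
      exact Gne (List.map_eq_nil_iff.mp h)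
    obtain ⟨v0, vt, hv⟩ := List.exists_cons_of_ne_nil hvne
    have hkey : ∀ a : Int, kfold (fun v => v) vt (max a v0) = max a Ans := by
      intro a
      have h1 := (hOB' a).1
      rw [hrhs, hlhs, hv] at h1
      exact h1
    set M := kfold (fun v => v) vt v0 with hM
    have e1 : max M Ans = Ans := by
      have := hkey Ans
      rw [max_comm Ans v0, kfold_init, ← hM, max_self] at this
      exact this
    have e2 : M = max M Ans := by
      have := hkey M
      rw [max_comm M v0, kfold_init, ← hM, max_self] at this
      exact this
    have hMAns : M = Ans := by omega
    rw [hv, PySem.List.max?_id_cons, Option.getD_some]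
    rw [← hMAns]
    rfl
  · -- n < 2: both programs return 0
    rw [PySem.List.pyRange_one_eq_nil (by omega : n + 1 ≤ 2), List.foldl_nil,
      PySem.List.pyRange_neg_one_eq_nil (by omega : n ≤ 1), List.foldl_nil,
      PySem.List.pyGetD_map_pyRange_of_nonneg _ (n+1) n [] hn0 (by omega),
      pyGetD_replicate_zero]
    rfl

-- ===== VERDICT (by name: the statement is the Claim_ definition above) =====
theorem getMaxGain1_spec : Claim_equal_getMaxGain1 := by
  intro n x y _ hpre
  unfold Spec_getMaxGain1
  exact getMaxGain1_spec' n x y hpre
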